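-- pv_equiv track=rewrite | github.com/Oyoerf/IESF-Convention-KnowledgeSociety-TrainTripsDistances | signal_batch_distances_V3.py | detect_line_type
-- ===== SOURCE A (Python) =====
-- def detect_line_type(classes):
--     """
--     Détermine le type de ligne ferroviaire à partir des classes.
--
--     Args:
--         classes: Set de classes de l'intersection
--
--     Returns:
--         str: 'LGV', 'TER', ou 'Unknown'
--     """
--     # LGV : Ligne à Grande Vitesse
--     # Indicateurs : vitesse élevée (>200 km/h), usage 'main', railway 'high_speed'
--     lgv_indicators = {'high_speed', 'highspeed', 'lgv', 'main'}
--
--     # TER : Transport Express Régional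
--     # Indicateurs : usage 'regional', 'branch', vitesse modérée
--     ter_indicators = {'regional', 'branch', 'secondary'}
--
--     classes_lower = {c.lower() for c in classes}
--
--     if classes_lower & lgv_indicators:
--         return 'LGV'
--     elif classes_lower & ter_indicators:
--         return 'TER'
--
--     # Vérifier les informations de vitesse si disponibles
--     for c in classes:
--         if 'maxspeed' in c.lower():
--             # Extraire la vitesse si possible
--             try:
--                 speed = int(''.join(filter(str.isdigit, c)))
--                 if speed >= 200:
--                     return 'LGV'
--                 elif speed < 160:
--                     return 'TER'
--             except:
--                 pass
--
--     return 'Unknown'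
-- ===== SOURCE B (Python) =====
-- def _speed_verdict(c):
--     """Verdict from a maxspeed class, or None if it does not resolve one."""
--     try:
--         speed = int(''.join(filter(str.isdigit, c)))
--         if speed >= 200:
--             return 'LGV'
--         if speed < 160:
--             return 'TER'
--     except:
--         pass
--     return None
--
--
-- def detect_line_type(classes):
--     """Single accumulating pass: track indicator hits and the first resolved
--     maxspeed verdict, then resolve with fixed priority LGV > TER > speed > Unknown."""
--     lgv_indicators = ('high_speed', 'highspeed', 'lgv', 'main')
--     ter_indicators = ('regional', 'branch', 'secondary')
--     found_lgv = False
--     found_ter = False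
--     verdict = None
--     for c in classes:
--         cl = c.lower()
--         if cl in lgv_indicators:
--             found_lgv = True
--         elif cl in ter_indicators:
--             found_ter = True
--         if verdict is None and 'maxspeed' in cl:
--             verdict = _speed_verdict(c)
--     if found_lgv:
--         return 'LGV'
--     if found_ter:
--         return 'TER'
--     return verdict if verdict is not None else 'Unknown'
-- ===== Notes on version B (the rewrite author's own statement) =====
-- stated objective: alternative
-- what changed: Replaced A's set-comprehension plus two bulk set-intersection tests plus a separate early-return speed loop by a single accumulating pass that tracks found_lgv/found_ter flags and the first resolved maxspeed verdict, resolving with fixed priority LGV > TER > speed > Unknown after the loop.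
import Mathlib
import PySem

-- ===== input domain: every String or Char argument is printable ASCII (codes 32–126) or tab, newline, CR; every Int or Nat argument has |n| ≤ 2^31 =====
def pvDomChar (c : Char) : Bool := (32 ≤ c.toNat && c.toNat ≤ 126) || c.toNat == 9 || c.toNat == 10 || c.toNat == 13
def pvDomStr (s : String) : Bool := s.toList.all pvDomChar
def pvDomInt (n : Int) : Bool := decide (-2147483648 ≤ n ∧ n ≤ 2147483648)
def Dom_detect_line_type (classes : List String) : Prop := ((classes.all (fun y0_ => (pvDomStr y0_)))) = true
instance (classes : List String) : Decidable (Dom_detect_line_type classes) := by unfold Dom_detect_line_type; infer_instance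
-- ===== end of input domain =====

-- B replaces A's set-comprehension + two bulk intersection tests + separate speed loop
-- by one accumulating pass with a fixed-priority resolution at the end (objective: alternative).

-- ===== PORT A =====
-- A's indicator sets
def pvLgvIndicators : PySem.Set String := PySem.Set.ofList ["high_speed", "highspeed", "lgv", "main"]
def pvTerIndicators : PySem.Set String := PySem.Set.ofList ["regional", "branch", "secondary"]

-- A's 'for c in classes' speed loop (early return; int('' ) raises → except: pass = skip)
def pvSpeedLoop : List String → String
  | [] => "Unknown"
  | c :: rest =>
    if PySem.Str.isIn "maxspeed" (PySem.Str.lower c) then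
      match PySem.Int.ofChars? (List.filter PySem.Chars.isdigit c.toList) with
      | some speed =>
        if speed ≥ 200 then "LGV"
        else if speed < 160 then "TER"
        else pvSpeedLoop rest
      | none => pvSpeedLoop rest
    else pvSpeedLoop rest

def detect_line_type (classes : List String) : String :=
  let classes_lower : PySem.Set String := PySem.Set.ofList (classes.map PySem.Str.lower)
  if PySem.Set.inter classes_lower pvLgvIndicators ≠ [] then "LGV"
  else if PySem.Set.inter classes_lower pvTerIndicators ≠ [] then "TER"
  else pvSpeedLoop classes

-- ===== PORT B =====
-- B's indicator tuples
def pvLgvTuple : List String := ["high_speed", "highspeed", "lgv", "main"]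
def pvTerTuple : List String := ["regional", "branch", "secondary"]

-- B's _speed_verdict helper (bare except on int('') = none)
def pvSpeedVerdict (c : String) : Option String :=
  match PySem.Int.ofChars? (List.filter PySem.Chars.isdigit c.toList) with
  | some speed =>
    if speed ≥ 200 then some "LGV"
    else if speed < 160 then some "TER"
    else none
  | none => none

-- one step of B's single accumulating pass over (found_lgv, found_ter, verdict)
def pvStepB (st : Bool × Bool × Option String) (c : String) : Bool × Bool × Option String :=
  let cl := PySem.Str.lower c
  let st1 : Bool × Bool × Option String :=
    if pvLgvTuple.contains cl then (true, st.2.1, st.2.2)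
    else if pvTerTuple.contains cl then (st.1, true, st.2.2)
    else st
  if st1.2.2 = none ∧ PySem.Str.isIn "maxspeed" cl then (st1.1, st1.2.1, pvSpeedVerdict c)
  else st1

def detect_line_type_alt (classes : List String) : String :=
  let st := classes.foldl pvStepB (false, false, none)
  if st.1 then "LGV"
  else if st.2.1 then "TER"
  else st.2.2.getD "Unknown"

-- ===== PRECONDITION & SPEC =====
def Spec_detect_line_type (classes : List String) (out : String) : Prop := out = detect_line_type_alt classes
instance (classes : List String) (out : String) : Decidable (Spec_detect_line_type classes out) := by unfold Spec_detect_line_type; infer_instance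

-- ===== CLAIM (what is proved, stated in full; the proofs are below) =====
def Claim_equal_detect_line_type : Prop := ∀ (classes : List String), Dom_detect_line_type classes → Spec_detect_line_type classes (detect_line_type classes)

-- ===== LEMMAS AND PROOFS =====

-- proof-side: A's speed loop as an Option (none = fell through to 'Unknown')
def pvScan : List String → Option String
  | [] => none
  | c :: rest =>
    if PySem.Str.isIn "maxspeed" (PySem.Str.lower c) then
      match pvSpeedVerdict c with
      | some x => some x
      | none => pvScan rest
    else pvScan rest

theorem pvSpeedLoop_eq_scan (cs : List String) : pvSpeedLoop cs = (pvScan cs).getD "Unknown" := by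
  induction cs with
  | nil => rfl
  | cons c rest ih =>
    simp only [pvSpeedLoop, pvScan, pvSpeedVerdict]
    split_ifs with h
    · cases PySem.Int.ofChars? (List.filter PySem.Chars.isdigit c.toList) with
      | none => simpa using ih
      | some speed =>
        by_cases h2 : speed ≥ 200
        · simp [h2]
        · by_cases h3 : speed < 160
          · simp [h2, h3]
          · simpa [h2, h3] using ih
    · exact ih

theorem pvMatchStep (c : String) (rest : List String) (v : Option String) :
    (match (if v = none ∧ PySem.Str.isIn "maxspeed" (PySem.Str.lower c) then pvSpeedVerdict c else v) with
     | some x => some x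
     | none => pvScan rest)
    = (match v with | some x => some x | none => pvScan (c :: rest)) := by
  cases v with
  | some x =>
    rw [if_neg (fun hh => by cases hh.1)]
  | none =>
    simp only [pvScan]
    by_cases h : PySem.Str.isIn "maxspeed" (PySem.Str.lower c) = true
    · rw [if_pos (show _ ∧ _ from ⟨by trivial, h⟩), if_pos h]
    · rw [if_neg (fun hh => h hh.2), if_neg h]

theorem pvFoldB (cs : List String) (a b : Bool) (v : Option String) :
    cs.foldl pvStepB (a, b, v) =
      (a || cs.any (fun c => pvLgvTuple.contains (PySem.Str.lower c)),
       b || cs.any (fun c => !pvLgvTuple.contains (PySem.Str.lower c)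
                              && pvTerTuple.contains (PySem.Str.lower c)),
       match v with | some x => some x | none => pvScan cs) := by
  induction cs generalizing a b v with
  | nil => cases v <;> simp [pvScan]
  | cons c rest ih =>
    have hstep : pvStepB (a, b, v) c =
        ((a || pvLgvTuple.contains (PySem.Str.lower c)),
         (b || (!pvLgvTuple.contains (PySem.Str.lower c)
                 && pvTerTuple.contains (PySem.Str.lower c))),
         if v = none ∧ PySem.Str.isIn "maxspeed" (PySem.Str.lower c) then pvSpeedVerdict c
         else v) := by
      simp only [pvStepB]
      cases hl : pvLgvTuple.contains (PySem.Str.lower c) <;>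
        cases ht : pvTerTuple.contains (PySem.Str.lower c) <;>
          simp [hl, ht] <;> split_ifs <;> rfl
    rw [List.foldl_cons, hstep, ih]
    simp only [List.any_cons, Bool.or_assoc]
    rw [pvMatchStep]

theorem pvLgvEq : pvLgvIndicators = pvLgvTuple := by decide

theorem pvTerEq : pvTerIndicators = pvTerTuple := by decide

theorem pvInterNe (cs : List String) (t : PySem.Set String) :
    (PySem.Set.inter (PySem.Set.ofList (cs.map PySem.Str.lower)) t ≠ []) ↔
      (∃ c ∈ cs, PySem.Str.lower c ∈ t) := by
  rw [Ne, List.eq_nil_iff_forall_not_mem]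
  push_neg
  constructor
  · rintro ⟨x, hx⟩
    rw [PySem.Set.mem_inter, PySem.Set.mem_ofList, List.mem_map] at hx
    obtain ⟨⟨c, hc, rfl⟩, hxt⟩ := hx
    exact ⟨c, hc, hxt⟩
  · rintro ⟨c, hc, ht⟩
    exact ⟨PySem.Str.lower c,
      by rw [PySem.Set.mem_inter, PySem.Set.mem_ofList, List.mem_map]; exact ⟨⟨c, hc, rfl⟩, ht⟩⟩

-- ===== VERDICT (by name: the statement is the Claim_ definition above) =====
theorem detect_line_type_spec : Claim_equal_detect_line_type := by
  intro cs _
  unfold Spec_detect_line_type detect_line_type detect_line_type_alt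
  rw [pvFoldB]
  by_cases hL : ∃ c ∈ cs, PySem.Str.lower c ∈ pvLgvTuple
  · have hA : PySem.Set.inter (PySem.Set.ofList (cs.map PySem.Str.lower)) pvLgvIndicators ≠ [] :=
      (pvInterNe cs _).mpr (by rw [pvLgvEq]; exact hL)
    simp [hA, hL]
  · have hA : ¬ (PySem.Set.inter (PySem.Set.ofList (cs.map PySem.Str.lower)) pvLgvIndicators ≠ []) := by
      rw [pvInterNe, pvLgvEq]; exact hL
    by_cases hT : ∃ c ∈ cs, PySem.Str.lower c ∈ pvTerTuple
    · have hA2 : PySem.Set.inter (PySem.Set.ofList (cs.map PySem.Str.lower)) pvTerIndicators ≠ [] :=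
        (pvInterNe cs _).mpr (by rw [pvTerEq]; exact hT)
      have hT' : ∃ c ∈ cs, PySem.Str.lower c ∉ pvLgvTuple ∧ PySem.Str.lower c ∈ pvTerTuple := by
        obtain ⟨c, hc, h⟩ := hT
        exact ⟨c, hc, fun hl => hL ⟨c, hc, hl⟩, h⟩
      simp [hA, hA2, hL, hT']
    · have hA2 : ¬ (PySem.Set.inter (PySem.Set.ofList (cs.map PySem.Str.lower)) pvTerIndicators ≠ []) := by
        rw [pvInterNe, pvTerEq]; exact hT
      have hT' : ¬ ∃ c ∈ cs, PySem.Str.lower c ∉ pvLgvTuple ∧ PySem.Str.lower c ∈ pvTerTuple := by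
        rintro ⟨c, hc, _, h⟩; exact hT ⟨c, hc, h⟩
      simp [hA, hA2, hL, hT', pvSpeedLoop_eq_scan]
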